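-- pv_equiv track=rewrite | github.com/dotCipher/CSE304 | HW1/hw1_lists.py | find_line_second_seen
-- ===== SOURCE A (Python) =====
-- def find_line_second_seen(variable, def_or_use_elements):
-- 	i = 0
-- 	lineFirstSeen = -1
-- 	lineSecondSeen = -1
-- 	# Find line second seen
-- 	while i < len(def_or_use_elements):
-- 		assignment = def_or_use_elements[i]
-- 		if (variable == assignment[1]) and (lineFirstSeen != -1):
-- 			lineSecondSeen = assignment[0]
-- 			break
-- 		if (variable == assignment[1]) and (lineFirstSeen == -1):
-- 			lineFirstSeen = assignment[0]
-- 		i += 1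
-- 	return lineSecondSeen
-- ===== SOURCE B (Python) =====
-- def find_line_second_seen(variable, def_or_use_elements):
--     matches = [line for (line, name) in def_or_use_elements if name == variable]
--     return matches[1] if len(matches) > 1 else -1
-- ===== Notes on version B (the rewrite author's own statement) =====
-- stated objective: simpler
-- what changed: Replaces A's two-sentinel early-exit while loop with a filter-all-matching-line-numbers comprehension followed by a single positional lookup (matches[1] if it exists, else -1).
-- outside the precondition, e.g. on find_line_second_seen('x', [(-1, 'x'), (5, 'x')]): A returns -1, B returns 5
import Mathlib
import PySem

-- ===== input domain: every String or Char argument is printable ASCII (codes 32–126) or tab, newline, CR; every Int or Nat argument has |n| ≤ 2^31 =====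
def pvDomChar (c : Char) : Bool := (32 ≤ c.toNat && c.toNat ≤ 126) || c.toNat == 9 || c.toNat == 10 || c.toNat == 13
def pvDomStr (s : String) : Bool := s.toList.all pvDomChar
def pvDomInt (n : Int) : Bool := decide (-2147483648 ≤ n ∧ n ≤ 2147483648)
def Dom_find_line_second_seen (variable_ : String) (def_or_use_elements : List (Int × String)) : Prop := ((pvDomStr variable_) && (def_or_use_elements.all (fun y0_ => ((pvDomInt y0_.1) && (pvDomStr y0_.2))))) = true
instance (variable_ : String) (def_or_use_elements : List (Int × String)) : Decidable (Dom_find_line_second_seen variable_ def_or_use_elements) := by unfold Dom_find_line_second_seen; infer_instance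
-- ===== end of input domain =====

-- B replaces A's two-sentinel early-exit loop by collecting all matching line numbers and indexing the second; objective: simpler.
-- ===== PORT A =====
-- A's while loop over indices, step for step: state = (lineFirstSeen); the break returns assignment[0].
def findA_loop (variable_ : String) : List (Int × String) → Int → Int
  | [], _ => -1
  | assignment :: rest, lineFirstSeen =>
    if variable_ == assignment.2 && lineFirstSeen != -1 then assignment.1
    else if variable_ == assignment.2 && lineFirstSeen == -1 then
      findA_loop variable_ rest assignment.1
    else findA_loop variable_ rest lineFirstSeen

def find_line_second_seen (variable_ : String) (def_or_use_elements : List (Int × String)) : Int :=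
  findA_loop variable_ def_or_use_elements (-1)

-- ===== PORT B =====
def find_line_second_seen_alt (variable_ : String) (def_or_use_elements : List (Int × String)) : Int :=
  let ms := (def_or_use_elements.filter (fun a => a.2 == variable_)).map (fun a => a.1)
  if 1 < ms.length then ms.getD 1 (-1) else -1

-- ===== PRECONDITION & SPEC =====
-- Pre_ excludes inputs where the variable occurs paired with line number -1: that value is not a real
-- line number and coincides with the not-yet-seen sentinel, a corner no caller would specify.
def Pre_find_line_second_seen (variable_ : String) (def_or_use_elements : List (Int × String)) : Prop :=
  ∀ p ∈ def_or_use_elements, p.2 = variable_ → p.1 ≠ -1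
instance (variable_ : String) (def_or_use_elements : List (Int × String)) : Decidable (Pre_find_line_second_seen variable_ def_or_use_elements) := by unfold Pre_find_line_second_seen; infer_instance
def pvWitness_find_line_second_seen : String × (List (Int × String)) := ("x", [(1, "x"), (2, "y"), (3, "x")])
def Spec_find_line_second_seen (variable_ : String) (def_or_use_elements : List (Int × String)) (out : Int) : Prop := out = find_line_second_seen_alt variable_ def_or_use_elements
instance (variable_ : String) (def_or_use_elements : List (Int × String)) (out : Int) : Decidable (Spec_find_line_second_seen variable_ def_or_use_elements out) := by unfold Spec_find_line_second_seen; infer_instance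

-- ===== CLAIM (what is proved, stated in full; the proofs are below) =====
def Claim_equal_find_line_second_seen : Prop := ∀ (variable_ : String) (def_or_use_elements : List (Int × String)), Dom_find_line_second_seen variable_ def_or_use_elements → Pre_find_line_second_seen variable_ def_or_use_elements → Spec_find_line_second_seen variable_ def_or_use_elements (find_line_second_seen variable_ def_or_use_elements)

-- ===== LEMMAS AND PROOFS =====
def pvMatches (variable_ : String) (l : List (Int × String)) : List Int :=
  (l.filter (fun a => a.2 == variable_)).map (fun a => a.1)

theorem pvMatches_cons (v : String) (a : Int × String) (rest : List (Int × String)) :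
    pvMatches v (a :: rest) =
      if a.2 = v then a.1 :: pvMatches v rest else pvMatches v rest := by
  by_cases h : a.2 = v <;> simp [pvMatches, h]

-- once a first line (≠ -1) has been recorded, the loop returns the line of the next match, or -1
theorem findA_loop_seen (variable_ : String) (l : List (Int × String)) (first : Int)
    (h : first ≠ -1) : findA_loop variable_ l first = (pvMatches variable_ l).headD (-1) := by
  induction l with
  | nil => simp [findA_loop, pvMatches]
  | cons a rest ih =>
    by_cases hm : variable_ = a.2
    · simp [findA_loop, pvMatches_cons, ← hm, h]
    · have hm' : ¬ a.2 = variable_ := fun e => hm e.symm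
      simp [findA_loop, pvMatches_cons, hm, hm', ih]

-- from the initial sentinel state, provided no matching row carries line -1,
-- the loop computes B's "second element of the match list, else -1"
theorem findA_loop_unseen (variable_ : String) (l : List (Int × String))
    (hpre : ∀ p ∈ l, p.2 = variable_ → p.1 ≠ -1) :
    findA_loop variable_ l (-1) =
      (if 1 < (pvMatches variable_ l).length then (pvMatches variable_ l).getD 1 (-1) else -1) := by
  induction l with
  | nil => simp [findA_loop, pvMatches]
  | cons a rest ih =>
    by_cases hm : variable_ = a.2
    · have ha : a.1 ≠ -1 := hpre a (by simp) hm.symm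
      have hL : findA_loop variable_ (a :: rest) (-1) = findA_loop variable_ rest a.1 := by
        simp [findA_loop, ← hm]
      rw [hL, findA_loop_seen variable_ rest a.1 ha, pvMatches_cons, if_pos hm.symm]
      cases pvMatches variable_ rest with
      | nil => simp
      | cons x xs => simp [List.getD]
    · have hm' : ¬ a.2 = variable_ := fun e => hm e.symm
      have hrest := ih (fun p hp => hpre p (List.mem_cons_of_mem _ hp))
      simp [findA_loop, pvMatches_cons, hm, hm', hrest]

-- ===== VERDICT (by name: the statement is the Claim_ definition above) =====
theorem find_line_second_seen_spec : Claim_equal_find_line_second_seen := by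
  intro variable_ l _ hpre
  show find_line_second_seen variable_ l = find_line_second_seen_alt variable_ l
  exact findA_loop_unseen variable_ l hpre
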